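-- pv_equiv track=rewrite | github.com/Qiskit/qiskit | qiskit/utils/entangler_map.py | get_entangler_map
-- ===== SOURCE A (Python) =====
-- def get_entangler_map(map_type, num_qubits, offset=0):
--     """Utility method to get an entangler map among qubits.
--
--     Args:
--         map_type (str): 'full' entangles each qubit with all the subsequent ones
--                         'linear' entangles each qubit with the next
--                         'sca' (shifted circular alternating entanglement) is a
--                         circular entanglement where the 'long' entanglement is
--                         shifted by one position every block and every block the
--                         role or control/target qubits alternate
--         num_qubits (int): Number of qubits for which the map is needed
--         offset (int): Some map_types (e.g. 'sca') can shift the gates in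
--                       the entangler map by the specified integer offset.
--
--     Returns:
--         list: A map of qubit index to an array of indexes to which this should be entangled
--
--     Raises:
--         ValueError: if map_type is not valid.
--     """
--     ret = []
--
--     if num_qubits > 1:
--         if map_type == 'full':
--             ret = [[i, j] for i in range(num_qubits) for j in range(i + 1, num_qubits)]
--         elif map_type == 'linear':
--             ret = [[i, i + 1] for i in range(num_qubits - 1)]
--         elif map_type == 'sca':
--             offset_idx = offset % num_qubits
--             if offset_idx % 2 == 0:  # even block numbers
--                 for i in reversed(range(offset_idx)):
--                     ret += [[i, i + 1]]
--
--                 ret += [[num_qubits - 1, 0]]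
--
--                 for i in reversed(range(offset_idx + 1, num_qubits)):
--                     ret += [[i - 1, i]]
--
--             else:  # odd block numbers
--                 for i in range(num_qubits - offset_idx - 1, num_qubits - 1):
--                     ret += [[i + 1, i]]
--
--                 ret += [[0, num_qubits - 1]]
--
--                 for i in range(num_qubits - offset_idx - 1):
--                     ret += [[i + 1, i]]
--         else:
--             raise ValueError("map_type only supports 'full', 'linear' or 'sca' type.")
--     return ret
-- ===== SOURCE B (Python) =====
-- def get_entangler_map(map_type, num_qubits, offset=0):
--     """Same map, but 'sca' is derived from the canonical circular edge list
--     by rotation / reversal / pair-swap instead of hand-rolled index loops."""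
--     if num_qubits <= 1:
--         return []
--     if map_type == 'full':
--         return [[i, j] for i in range(num_qubits) for j in range(i + 1, num_qubits)]
--     if map_type == 'linear':
--         return [[i, i + 1] for i in range(num_qubits - 1)]
--     if map_type == 'sca':
--         n = num_qubits
--         base = [[i, i + 1] for i in range(n - 1)] + [[n - 1, 0]]
--         k = offset % n
--         if k % 2 == 0:
--             rot = base[k:] + base[:k]
--             return [pair for pair in reversed(rot)]
--         rot = base[n - 1 - k:] + base[:n - 1 - k]
--         return [[b, a] for a, b in rot]
--     raise ValueError("map_type only supports 'full', 'linear' or 'sca' type.")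
-- ===== Notes on version B (the rewrite author's own statement) =====
-- stated objective: alternative
-- what changed: The 'sca' branch builds the canonical circular edge list once and derives the result by slicing-based rotation plus a whole-list reversal (even blocks) or per-pair swap (odd blocks), replacing A's three hand-rolled reversed/forward index loops; 'full' and 'linear' keep their one-line comprehensions.
import Mathlib
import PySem

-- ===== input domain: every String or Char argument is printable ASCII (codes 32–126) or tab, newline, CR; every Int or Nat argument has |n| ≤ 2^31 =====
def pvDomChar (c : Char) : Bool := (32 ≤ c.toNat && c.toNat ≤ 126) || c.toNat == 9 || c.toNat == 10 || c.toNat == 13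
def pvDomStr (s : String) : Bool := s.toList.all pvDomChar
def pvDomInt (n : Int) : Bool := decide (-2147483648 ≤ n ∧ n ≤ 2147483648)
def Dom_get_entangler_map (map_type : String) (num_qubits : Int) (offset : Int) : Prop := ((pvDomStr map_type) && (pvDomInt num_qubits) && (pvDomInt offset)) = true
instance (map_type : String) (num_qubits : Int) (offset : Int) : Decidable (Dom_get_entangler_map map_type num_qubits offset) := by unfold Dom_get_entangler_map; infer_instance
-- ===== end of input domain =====

-- B rebuilds the 'sca' block as a rotation/reversal/pair-swap of the canonical circular
-- edge list instead of A's three hand-rolled index loops (objective: alternative).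


-- ===== PORT A =====
def get_entangler_map (map_type : String) (num_qubits : Int) (offset : Int) : List (List Int) :=
  if 1 < num_qubits then
    if map_type = "full" then
      (PySem.List.pyRange 0 num_qubits 1).flatMap
        (fun i => (PySem.List.pyRange (i + 1) num_qubits 1).map (fun j => [i, j]))
    else if map_type = "linear" then
      (PySem.List.pyRange 0 (num_qubits - 1) 1).map (fun i => [i, i + 1])
    else if map_type = "sca" then
      let offset_idx := PySem.Int.mod offset num_qubits
      if PySem.Int.mod offset_idx 2 = 0 then  -- even block numbers
        let ret := ((PySem.List.pyRange 0 offset_idx 1).reverse).foldl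
          (fun acc i => acc ++ [[i, i + 1]]) []
        let ret := ret ++ [[num_qubits - 1, 0]]
        ((PySem.List.pyRange (offset_idx + 1) num_qubits 1).reverse).foldl
          (fun acc i => acc ++ [[i - 1, i]]) ret
      else  -- odd block numbers
        let ret := (PySem.List.pyRange (num_qubits - offset_idx - 1) (num_qubits - 1) 1).foldl
          (fun acc i => acc ++ [[i + 1, i]]) []
        let ret := ret ++ [[0, num_qubits - 1]]
        (PySem.List.pyRange 0 (num_qubits - offset_idx - 1) 1).foldl
          (fun acc i => acc ++ [[i + 1, i]]) ret
    else []  -- raise ValueError — excluded by Pre_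
  else []

-- ===== PORT B =====
def get_entangler_map_alt (map_type : String) (num_qubits : Int) (offset : Int) : List (List Int) :=
  if num_qubits ≤ 1 then []
  else if map_type = "full" then
    (PySem.List.pyRange 0 num_qubits 1).flatMap
      (fun i => (PySem.List.pyRange (i + 1) num_qubits 1).map (fun j => [i, j]))
  else if map_type = "linear" then
    (PySem.List.pyRange 0 (num_qubits - 1) 1).map (fun i => [i, i + 1])
  else if map_type = "sca" then
    let n := num_qubits
    let base := ((PySem.List.pyRange 0 (n - 1) 1).map (fun i => [i, i + 1])) ++ [[n - 1, 0]]
    let k := PySem.Int.mod offset n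
    if PySem.Int.mod k 2 = 0 then
      (PySem.List.slice base (some k) none ++ PySem.List.slice base none (some k)).reverse
    else
      let j := n - 1 - k
      (PySem.List.slice base (some j) none ++ PySem.List.slice base none (some j)).map
        (fun p => match p with  -- 'for a, b in rot' unpacking; every element of base is a 2-list
          | a :: b :: _ => [b, a]
          | _ => [])
  else []  -- raise ValueError — excluded by Pre_

-- ===== PRECONDITION & SPEC =====
-- Pre_ excludes exactly the inputs where A raises ValueError: an unrecognised map_type with num_qubits > 1.
def Pre_get_entangler_map (map_type : String) (num_qubits : Int) (offset : Int) : Prop :=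
  num_qubits ≤ 1 ∨ map_type = "full" ∨ map_type = "linear" ∨ map_type = "sca"
instance (map_type : String) (num_qubits : Int) (offset : Int) : Decidable (Pre_get_entangler_map map_type num_qubits offset) := by unfold Pre_get_entangler_map; infer_instance

def pvWitness_get_entangler_map : String × Int × Int := ("sca", 5, 3)

def Spec_get_entangler_map (map_type : String) (num_qubits : Int) (offset : Int) (out : List (List Int)) : Prop := out = get_entangler_map_alt map_type num_qubits offset
instance (map_type : String) (num_qubits : Int) (offset : Int) (out : List (List Int)) : Decidable (Spec_get_entangler_map map_type num_qubits offset out) := by unfold Spec_get_entangler_map; infer_instance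

-- ===== CLAIM (what is proved, stated in full; the proofs are below) =====
def Claim_equal_get_entangler_map : Prop := ∀ (map_type : String) (num_qubits : Int) (offset : Int), Dom_get_entangler_map map_type num_qubits offset → Pre_get_entangler_map map_type num_qubits offset → Spec_get_entangler_map map_type num_qubits offset (get_entangler_map map_type num_qubits offset)

-- ===== LEMMAS AND PROOFS =====

-- shift lemma: A's second even-case loop runs over range(k+1, n) emitting [i-1, i];
-- that is the same list as range(k, n-1) emitting [i, i+1] (B's base-edge tail).
lemma shift_even (n k : Int) :
    (PySem.List.pyRange (k + 1) n 1).map (fun i => [i - 1, i]) =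
    (PySem.List.pyRange k (n - 1) 1).map (fun i : Int => [i, i + 1]) := by
  rw [PySem.List.pyRange_one, PySem.List.pyRange_one, List.map_map, List.map_map]
  have h : (n - (k + 1)).toNat = (n - 1 - k).toNat := by omega
  rw [h]
  apply List.map_congr_left
  intro t _
  simp [Function.comp]
  constructor <;> omega

-- splitting B's base edge list at an index 0 ≤ j ≤ n-1
lemma base_split (n j : Int) (h0 : 0 ≤ j) (h1 : j ≤ n - 1) :
    (PySem.List.pyRange 0 (n - 1) 1).map (fun i : Int => [i, i + 1]) =
    (PySem.List.pyRange 0 j 1).map (fun i : Int => [i, i + 1]) ++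
    (PySem.List.pyRange j (n - 1) 1).map (fun i : Int => [i, i + 1]) := by
  rw [PySem.List.pyRange_one_append 0 j (n - 1) h0 h1, List.map_append]

lemma len_prefix (j : Int) (_h0 : 0 ≤ j) :
    ((PySem.List.pyRange 0 j 1).map (fun i : Int => [i, i + 1])).length = j.toNat := by
  simp [PySem.List.length_pyRange_one]

lemma sca_eq (n off : Int) (hn : 1 < n) :
    get_entangler_map "sca" n off = get_entangler_map_alt "sca" n off := by
  have hnpos : (0 : Int) < n := by omega
  unfold get_entangler_map get_entangler_map_alt
  simp only [hn, if_pos,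
    (by decide : ¬ ("sca" : String) = "full"), (by decide : ¬ ("sca" : String) = "linear")]
  rw [if_neg (show ¬ n ≤ 1 by omega)]
  simp only [if_false]
  set k := PySem.Int.mod off n with hk
  have hk0 : 0 ≤ k := PySem.Int.mod_nonneg off hnpos
  have hkn : k < n := PySem.Int.mod_lt off hnpos
  by_cases hpar : PySem.Int.mod k 2 = 0
  · -- even block
    simp only [hpar, if_pos]
    rw [PySem.List.foldl_append_singleton_eq_map, PySem.List.foldl_append_singleton_eq_map,
      PySem.List.slice_from _ hk0, PySem.List.slice_to _ hk0,
      base_split n k hk0 (by omega), List.nil_append]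
    rw [List.drop_append_of_le_length (by simp only [List.length_append, List.length_map, PySem.List.length_pyRange_one]; omega),
      List.take_append_of_le_length (by simp only [List.length_append, List.length_map, PySem.List.length_pyRange_one]; omega),
      List.drop_left' (len_prefix k hk0), List.take_left' (len_prefix k hk0)]
    rw [List.map_reverse, List.map_reverse, shift_even n k]
    simp [List.reverse_append]
  · -- odd block
    simp only [hpar, if_false]
    rw [PySem.List.foldl_append_singleton_eq_map, PySem.List.foldl_append_singleton_eq_map,
      List.nil_append]
    have hj0 : (0 : Int) ≤ n - 1 - k := by omega
    rw [PySem.List.slice_from _ hj0, PySem.List.slice_to _ hj0,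
      base_split n (n - 1 - k) hj0 (by omega)]
    rw [List.drop_append_of_le_length (by simp only [List.length_append, List.length_map, PySem.List.length_pyRange_one]; omega),
      List.take_append_of_le_length (by simp only [List.length_append, List.length_map, PySem.List.length_pyRange_one]; omega),
      List.drop_left' (len_prefix _ hj0), List.take_left' (len_prefix _ hj0)]
    have harg : n - k - 1 = n - 1 - k := by ring
    rw [harg]
    simp only [List.map_append, List.map_map]
    rfl

-- ===== VERDICT (by name: the statement is the Claim_ definition above) =====
theorem get_entangler_map_spec : Claim_equal_get_entangler_map := by
  intro mt n off _ hpre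
  unfold Spec_get_entangler_map
  by_cases hn : n ≤ 1
  · simp [get_entangler_map, get_entangler_map_alt, hn]
  · have hn' : 1 < n := by omega
    rcases hpre with h | h | h | h
    · omega
    · subst h; simp [get_entangler_map, get_entangler_map_alt, hn, hn']
    · subst h; simp [get_entangler_map, get_entangler_map_alt, hn, hn']
    · subst h; exact sca_eq n off hn'
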